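-- pv_equiv track=rewrite | github.com/PelzKo/mario-kart-tournament | src/tournament/scheduling.py | seed_bracket
-- ===== SOURCE A (Python) =====
-- from typing import List
--
-- def seed_bracket(players_by_seed: list, bracket_sz: int) -> List[List]:
--     """
--     Given players sorted by seed (best first), take the top bracket_sz players
--     and arrange them into first-round bracket games of 4 players each.
--
--     Seeding: game 1 gets seeds 1, N, N-1, 2 (top and bottom seeds together),
--     in a snake pattern.
--
--     Returns: list of games, each game is a list of players.
--     """
--     top = players_by_seed[:bracket_sz]
--     num_games = bracket_sz // 4
--
--     # Classic bracket seeding: pair seed 1 with N, 2 with N-1, etc.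
--     # For groups of 4: game i gets players at positions i and (bracket_sz-1-i)
--     # and the middle two.
--     # With groups of 4 we do: game i has seeds [i+1, bracket_sz-i, bracket_sz//2-i, bracket_sz//2+i+1]
--     # but simpler: just snake-fill groups of 4.
--
--     # Snake seeding for groups of 4:
--     # Sort indices in a snake pattern: 0, N-1, 1, N-2, 2, N-3, ...
--     indices = []
--     lo, hi = 0, bracket_sz - 1
--     toggle = True
--     while lo <= hi:
--         if toggle:
--             indices.append(lo)
--             lo += 1
--         else:
--             indices.append(hi)
--             hi -= 1
--         toggle = not toggle
--
--     games = []
--     for i in range(num_games):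
--         game_indices = indices[i * 4: (i + 1) * 4]
--         games.append([top[j] for j in game_indices])
--
--     return games
-- ===== SOURCE B (Python) =====
-- from typing import List
--
-- def seed_bracket(players_by_seed: list, bracket_sz: int) -> List[List]:
--     # Closed-form snake seeding: no index table, no slicing -- game i directly
--     # takes seeds at positions 2i, N-1-2i, 2i+1, N-2-2i.
--     n = bracket_sz
--     return [[players_by_seed[2 * i],
--              players_by_seed[n - 1 - 2 * i],
--              players_by_seed[2 * i + 1],
--              players_by_seed[n - 2 - 2 * i]]
--             for i in range(n // 4)]
-- ===== Notes on version B (the rewrite author's own statement) =====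
-- stated objective: simpler
-- what changed: Drops the while-loop snake-index table and the per-game slicing entirely: B emits each game directly with closed-form positions 2i, N-1-2i, 2i+1, N-2-2i in one comprehension.
import Mathlib
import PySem

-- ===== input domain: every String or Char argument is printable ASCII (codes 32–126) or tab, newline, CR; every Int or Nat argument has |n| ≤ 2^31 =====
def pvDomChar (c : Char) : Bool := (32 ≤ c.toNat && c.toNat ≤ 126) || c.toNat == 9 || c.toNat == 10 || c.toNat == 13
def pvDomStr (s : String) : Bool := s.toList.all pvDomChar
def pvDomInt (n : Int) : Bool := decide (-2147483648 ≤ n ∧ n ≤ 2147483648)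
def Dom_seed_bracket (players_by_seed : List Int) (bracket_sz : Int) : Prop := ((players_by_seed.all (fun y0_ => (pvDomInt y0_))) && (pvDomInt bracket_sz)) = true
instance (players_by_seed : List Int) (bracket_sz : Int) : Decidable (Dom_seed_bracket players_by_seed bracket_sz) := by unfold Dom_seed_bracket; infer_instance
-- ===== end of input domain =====

-- B replaces A's while-loop snake-index table and per-game slicing by a closed-form
-- comprehension (game i = positions 2i, N-1-2i, 2i+1, N-2-2i); objective: simpler.

-- ===== PORT A =====
-- the while-loop building 'indices' (snake pattern)
def pvSnake (lo hi : Int) (toggle : Bool) : List Int :=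
  if _h : lo ≤ hi then
    if toggle then lo :: pvSnake (lo + 1) hi false
    else hi :: pvSnake lo (hi - 1) true
  else []
termination_by (hi + 1 - lo).toNat
decreasing_by all_goals omega

def seed_bracket (players_by_seed : List Int) (bracket_sz : Int) : List (List Int) :=
  let top := PySem.List.slice players_by_seed none (some bracket_sz)
  let num_games := PySem.Int.floordiv bracket_sz 4
  let indices := pvSnake 0 (bracket_sz - 1) true
  -- 'top[j]' raises IndexError when out of range; under Pre_ every j is in range,
  -- so pyGetD with default 0 is exact there.
  (PySem.List.pyRange 0 num_games 1).foldl
    (fun games i =>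
      games ++ [(PySem.List.slice indices (some (i * 4)) (some ((i + 1) * 4))).map
                  (fun j => PySem.List.pyGetD top j 0)]) []

-- ===== PORT B =====
def seed_bracket_alt (players_by_seed : List Int) (bracket_sz : Int) : List (List Int) :=
  (PySem.List.pyRange 0 (PySem.Int.floordiv bracket_sz 4) 1).map
    (fun i => [PySem.List.pyGetD players_by_seed (2 * i) 0,
               PySem.List.pyGetD players_by_seed (bracket_sz - 1 - 2 * i) 0,
               PySem.List.pyGetD players_by_seed (2 * i + 1) 0,
               PySem.List.pyGetD players_by_seed (bracket_sz - 2 - 2 * i) 0])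

-- ===== PRECONDITION & SPEC =====
-- Pre_ excludes exactly the inputs on which A raises IndexError: at least one game
-- (bracket_sz ≥ 4) but fewer than bracket_sz players.
def Pre_seed_bracket (players_by_seed : List Int) (bracket_sz : Int) : Prop :=
  4 ≤ bracket_sz → bracket_sz ≤ players_by_seed.length
instance (players_by_seed : List Int) (bracket_sz : Int) : Decidable (Pre_seed_bracket players_by_seed bracket_sz) := by unfold Pre_seed_bracket; infer_instance

def pvWitness_seed_bracket : List Int × Int := ([1, 2, 3, 4, 5, 6, 7, 8], 8)

def Spec_seed_bracket (players_by_seed : List Int) (bracket_sz : Int) (out : List (List Int)) : Prop := out = seed_bracket_alt players_by_seed bracket_sz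
instance (players_by_seed : List Int) (bracket_sz : Int) (out : List (List Int)) : Decidable (Spec_seed_bracket players_by_seed bracket_sz out) := by unfold Spec_seed_bracket; infer_instance

-- ===== CLAIM (what is proved, stated in full; the proofs are below) =====
def Claim_equal_seed_bracket : Prop := ∀ (players_by_seed : List Int) (bracket_sz : Int), Dom_seed_bracket players_by_seed bracket_sz → Pre_seed_bracket players_by_seed bracket_sz → Spec_seed_bracket players_by_seed bracket_sz (seed_bracket players_by_seed bracket_sz)

-- ===== LEMMAS AND PROOFS =====

-- unfolding pvSnake one full zig-zag pair of steps
theorem pvSnake_two (lo hi : Int) (h : lo + 1 ≤ hi) :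
    pvSnake lo hi true = lo :: hi :: pvSnake (lo + 1) (hi - 1) true := by
  rw [pvSnake, dif_pos (by omega), if_pos rfl,
      pvSnake, dif_pos (by omega), if_neg (by simp)]

theorem pvSnake_four (lo hi : Int) (h : lo + 3 ≤ hi) :
    pvSnake lo hi true = lo :: hi :: (lo + 1) :: (hi - 1) :: pvSnake (lo + 2) (hi - 2) true := by
  rw [pvSnake_two lo hi (by omega), pvSnake_two (lo + 1) (hi - 1) (by omega),
      show lo + 1 + 1 = lo + 2 from by ring, show hi - 1 - 1 = hi - 2 from by ring]

theorem pvSnake_drop4 (i : ℕ) (lo hi : Int) (h : lo + 4 * i ≤ hi + 1) :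
    List.drop (4 * i) (pvSnake lo hi true) = pvSnake (lo + 2 * i) (hi - 2 * i) true := by
  induction i generalizing lo hi with
  | zero => simp
  | succ k ih =>
    rw [pvSnake_four lo hi (by push_cast at h ⊢; omega)]
    rw [show 4 * (k + 1) = 4 * k + 1 + 1 + 1 + 1 from by ring]
    simp only [List.drop_succ_cons]
    rw [ih (lo + 2) (hi - 2) (by push_cast at h ⊢; omega)]
    congr 1 <;> push_cast <;> ring

theorem pvSnake_take4 (lo hi : Int) (h : lo + 3 ≤ hi) :
    List.take 4 (pvSnake lo hi true) = [lo, hi, lo + 1, hi - 1] := by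
  rw [pvSnake_four lo hi h]; rfl

theorem pyGetD_take (xs : List Int) (t : ℕ) (j : Int) (hj : 0 ≤ j) (hjt : j < (t : Int))
    (hlen : j < (xs.length : Int)) :
    PySem.List.pyGetD (xs.take t) j 0 = PySem.List.pyGetD xs j 0 := by
  have hjn : j.toNat < t := by omega
  have hjl : j.toNat < xs.length := by omega
  rw [PySem.List.pyGetD_eq_getElem (xs.take t) 0 hj (by simp; omega),
      PySem.List.pyGetD_eq_getElem xs 0 hj hlen]
  simp [List.getElem_take]

-- ===== VERDICT (by name: the statement is the Claim_ definition above) =====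
theorem seed_bracket_spec : Claim_equal_seed_bracket := by
  intro players n _hdom hpre
  show seed_bracket players n = seed_bracket_alt players n
  unfold seed_bracket seed_bracket_alt
  rw [PySem.List.foldl_append_singleton_eq_map]
  set g := PySem.Int.floordiv n 4 with hg
  by_cases h4 : 4 ≤ n
  · have hlen : n ≤ (players.length : Int) := hpre h4
    have hg4 : g * 4 ≤ n := by
      rw [hg]
      exact (PySem.Int.le_floordiv_iff_mul_le (by norm_num)).mp le_rfl
    have hg1 : 1 ≤ g := by
      rw [hg]; exact (PySem.Int.le_floordiv_iff_mul_le (by norm_num)).mpr (by omega)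
    apply List.map_congr_left
    intro i hi
    rw [PySem.List.mem_pyRange_one] at hi
    obtain ⟨hi0, hig⟩ := hi
    -- bounds for the four positions
    have h4i : 4 * (i + 1) ≤ n := by nlinarith
    -- the slice of the snake table
    have hslice : PySem.List.slice (pvSnake 0 (n - 1) true) (some (i * 4)) (some ((i + 1) * 4))
        = [2 * i, n - 1 - 2 * i, 2 * i + 1, n - 2 - 2 * i] := by
      rw [PySem.List.slice_toNat _ (by omega) (by omega)]
      have hiN : ((i * 4).toNat : Int) = 4 * i.toNat := by omega
      have hdrop : (i * 4).toNat = 4 * i.toNat := by omega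
      rw [hdrop, pvSnake_drop4 i.toNat 0 (n - 1) (by omega)]
      have htk : ((i + 1) * 4).toNat - 4 * i.toNat = 4 := by omega
      rw [htk, pvSnake_take4 _ _ (by omega)]
      have h2i : (0 : Int) + 2 * i.toNat = 2 * i := by omega
      have h2i' : (n - 1) - 2 * (i.toNat : Int) = n - 1 - 2 * i := by omega
      rw [h2i, h2i']
      norm_num
      omega
    rw [hslice]
    have htop : PySem.List.slice players none (some n) = players.take n.toNat :=
      PySem.List.slice_to _ (by omega)
    rw [htop]
    simp only [List.map_cons, List.map_nil]
    congr 1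
    · exact pyGetD_take players n.toNat (2 * i) (by omega) (by omega) (by omega)
    congr 1
    · exact pyGetD_take players n.toNat (n - 1 - 2 * i) (by omega) (by omega) (by omega)
    congr 1
    · exact pyGetD_take players n.toNat (2 * i + 1) (by omega) (by omega) (by omega)
    congr 1
    · exact pyGetD_take players n.toNat (n - 2 - 2 * i) (by omega) (by omega) (by omega)
  · -- fewer than 4 players requested: no games on either side
    have : g < 1 := by
      rw [hg]
      rw [PySem.Int.floordiv_lt_iff_lt_mul (by norm_num)]
      omega
    rw [PySem.List.pyRange_one_eq_nil (by omega)]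
    simp
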